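-- pv_equiv track=rewrite | github.com/nischiy/bot_clean | app/run.py | _prioritize_blockers
-- ===== SOURCE A (Python) =====
-- from typing import Callable, Optional, Any, Dict, List, Tuple
--
-- def _prioritize_blockers(blockers: List[str]) -> List[str]:
--     if not blockers:
--         return []
--     seen = set()
--
--     def _uniq(items: List[str]) -> List[str]:
--         ordered: List[str] = []
--         for item in items:
--             if item in seen:
--                 continue
--             seen.add(item)
--             ordered.append(item)
--         return ordered
--
--     funds_blockers = [b for b in blockers if b in ("funds_source_missing", "funds_nonpositive")]
--     if funds_blockers:
--         return _uniq(funds_blockers)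
--
--     sizing_prefixes = (
--         "min_qty_not_met_after_rounding",
--         "invalid_entry",
--         "invalid_sl",
--         "invalid_step_size",
--         "invalid_min_qty",
--         "invalid_sl_distance",
--         "invalid_leverage",
--     )
--     sizing_blockers = [b for b in blockers if any(str(b).startswith(p) for p in sizing_prefixes)]
--     if sizing_blockers:
--         return _uniq(sizing_blockers)
--
--     margin_blockers = [b for b in blockers if str(b).startswith("insufficient_margin")]
--     strategy_blockers = [
--         b
--         for b in blockers
--         if isinstance(b, str)
--         and any(b.startswith(prefix) for prefix in ("T:", "B:", "M:", "P:", "C:", "R:", "X:"))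
--     ]
--     other_blockers = [
--         b
--         for b in blockers
--         if b not in margin_blockers and b not in strategy_blockers
--     ]
--     return _uniq([*margin_blockers, *strategy_blockers, *other_blockers])
-- ===== SOURCE B (Python) =====
-- from typing import List
--
-- _SIZING_PREFIXES = (
--     "min_qty_not_met_after_rounding",
--     "invalid_entry",
--     "invalid_sl",
--     "invalid_step_size",
--     "invalid_min_qty",
--     "invalid_sl_distance",
--     "invalid_leverage",
-- )
-- _STRATEGY_PREFIXES = ("T:", "B:", "M:", "P:", "C:", "R:", "X:")
--
--
-- def _dedup(items: List[str]) -> List[str]: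
--     return list(dict.fromkeys(items))
--
--
-- def _prioritize_blockers(blockers: List[str]) -> List[str]:
--     funds: List[str] = []
--     sizing: List[str] = []
--     margin: List[str] = []
--     strategy: List[str] = []
--     other: List[str] = []
--     for b in blockers:
--         if b in ("funds_source_missing", "funds_nonpositive"):
--             funds.append(b)
--         elif any(str(b).startswith(p) for p in _SIZING_PREFIXES):
--             sizing.append(b)
--         elif str(b).startswith("insufficient_margin"):
--             margin.append(b)
--         elif isinstance(b, str) and any(b.startswith(p) for p in _STRATEGY_PREFIXES):
--             strategy.append(b)
--         else:
--             other.append(b)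
--     if funds:
--         return _dedup(funds)
--     if sizing:
--         return _dedup(sizing)
--     return _dedup(margin + strategy + other)
-- ===== Notes on version B (the rewrite author's own statement) =====
-- stated objective: alternative
-- what changed: Replaces A's four repeated full-list comprehensions with early returns by a single classification pass that buckets each blocker into funds/sizing/margin/strategy/other, followed by a separate selection step, and replaces A's hand-written seen-set uniq loop by dict.fromkeys dedup.
import Mathlib
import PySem

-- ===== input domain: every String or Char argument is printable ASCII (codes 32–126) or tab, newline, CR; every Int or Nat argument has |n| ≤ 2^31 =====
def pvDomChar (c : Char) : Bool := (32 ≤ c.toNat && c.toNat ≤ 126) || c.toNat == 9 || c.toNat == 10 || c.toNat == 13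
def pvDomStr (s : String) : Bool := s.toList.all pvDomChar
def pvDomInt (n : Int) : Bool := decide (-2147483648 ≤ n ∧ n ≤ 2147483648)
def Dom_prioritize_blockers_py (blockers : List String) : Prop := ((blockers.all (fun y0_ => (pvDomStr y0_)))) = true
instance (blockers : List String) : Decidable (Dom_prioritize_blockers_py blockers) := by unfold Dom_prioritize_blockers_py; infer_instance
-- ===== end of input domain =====

-- B replaces A's four repeated full-list comprehensions and early returns with one classification
-- pass into five buckets plus a selection step (objective: alternative decomposition, same cost).

-- ===== PORT A =====
-- A's _uniq: a shared 'seen' set plus an 'ordered' output list, one loop per call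
def pyA_uniq (items : List String) : List String :=
  (items.foldl
    (fun (st : PySem.Set String × List String) item =>
      if PySem.Set.contains st.1 item then st
      else (PySem.Set.add st.1 item, st.2 ++ [item]))
    (PySem.Set.empty, [])).2

def prioritize_blockers_py (blockers : List String) : List String :=
  if blockers = [] then []
  else
    let funds_blockers := blockers.filter
      (fun b => b == "funds_source_missing" || b == "funds_nonpositive")
    if funds_blockers ≠ [] then pyA_uniq funds_blockers
    else
      let sizing_prefixes := ["min_qty_not_met_after_rounding", "invalid_entry", "invalid_sl",
        "invalid_step_size", "invalid_min_qty", "invalid_sl_distance", "invalid_leverage"]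
      let sizing_blockers := blockers.filter
        (fun b => sizing_prefixes.any (fun p => PySem.Str.startswith b p))
      if sizing_blockers ≠ [] then pyA_uniq sizing_blockers
      else
        let margin_blockers := blockers.filter
          (fun b => PySem.Str.startswith b "insufficient_margin")
        let strategy_blockers := blockers.filter
          (fun b => ["T:", "B:", "M:", "P:", "C:", "R:", "X:"].any
            (fun p => PySem.Str.startswith b p))
        let other_blockers := blockers.filter
          (fun b => !margin_blockers.contains b && !strategy_blockers.contains b)
        pyA_uniq (margin_blockers ++ strategy_blockers ++ other_blockers)

-- ===== PORT B =====
def altSizingPrefixes : List String :=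
  ["min_qty_not_met_after_rounding", "invalid_entry", "invalid_sl",
   "invalid_step_size", "invalid_min_qty", "invalid_sl_distance", "invalid_leverage"]

def altStrategyPrefixes : List String := ["T:", "B:", "M:", "P:", "C:", "R:", "X:"]

-- B's _dedup is list(dict.fromkeys(items)) = PySem.List.dedup
def altDedup (items : List String) : List String :=
  PySem.List.dedup items

-- one classification step of B's single loop
def altClassify
    (st : List String × List String × List String × List String × List String)
    (b : String) : List String × List String × List String × List String × List String :=
  match st with
  | (funds, sizing, margin, strategy, other) =>
    if b == "funds_source_missing" || b == "funds_nonpositive" then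
      (funds ++ [b], sizing, margin, strategy, other)
    else if altSizingPrefixes.any (fun p => PySem.Str.startswith b p) then
      (funds, sizing ++ [b], margin, strategy, other)
    else if PySem.Str.startswith b "insufficient_margin" then
      (funds, sizing, margin ++ [b], strategy, other)
    else if altStrategyPrefixes.any (fun p => PySem.Str.startswith b p) then
      (funds, sizing, margin, strategy ++ [b], other)
    else
      (funds, sizing, margin, strategy, other ++ [b])

def prioritize_blockers_py_alt (blockers : List String) : List String :=
  match blockers.foldl altClassify ([], [], [], [], []) with
  | (funds, sizing, margin, strategy, other) =>
    if funds ≠ [] then altDedup funds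
    else if sizing ≠ [] then altDedup sizing
    else altDedup (margin ++ strategy ++ other)

-- ===== PRECONDITION & SPEC =====
def Spec_prioritize_blockers_py (blockers : List String) (out : List String) : Prop := out = prioritize_blockers_py_alt blockers
instance (blockers : List String) (out : List String) : Decidable (Spec_prioritize_blockers_py blockers out) := by unfold Spec_prioritize_blockers_py; infer_instance

-- ===== CLAIM (what is proved, stated in full; the proofs are below) =====
def Claim_equal_prioritize_blockers_py : Prop := ∀ (blockers : List String), Dom_prioritize_blockers_py blockers → Spec_prioritize_blockers_py blockers (prioritize_blockers_py blockers)


-- ===== LEMMAS AND PROOFS =====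

-- abbreviations for the proofs only (the ports spell the predicates out)
def pF (b : String) : Bool := b == "funds_source_missing" || b == "funds_nonpositive"
def pSz (b : String) : Bool := altSizingPrefixes.any (fun p => PySem.Str.startswith b p)
def pM (b : String) : Bool := PySem.Str.startswith b "insufficient_margin"
def pSt (b : String) : Bool := altStrategyPrefixes.any (fun p => PySem.Str.startswith b p)

theorem prefix_head {c d : Char} {cs ds l : List Char} (h1 : (c :: cs) <+: l)
    (h2 : (d :: ds) <+: l) : c = d := by
  obtain ⟨t1, rfl⟩ := h1
  obtain ⟨t2, h⟩ := h2
  simp at h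
  exact h.1.symm

-- a margin blocker never carries a strategy prefix (the first characters differ)
theorem pM_pSt (b : String) (h : pM b = true) : pSt b = false := by
  have hm : ('i' :: "nsufficient_margin".toList) <+: b.toList := by
    simpa [pM, PySem.Chars.startswith_iff] using h
  by_contra hc
  have hst : ∃ p ∈ altStrategyPrefixes, PySem.Str.startswith b p = true := by
    simpa [pSt, List.any_eq_true, Bool.not_eq_false] using hc
  obtain ⟨p, hp, hsw⟩ := hst
  have hpre : p.toList <+: b.toList := by
    simpa [PySem.Chars.startswith_iff] using hsw
  simp [altStrategyPrefixes] at hp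
  rcases hp with rfl | rfl | rfl | rfl | rfl | rfl | rfl <;>
    exact absurd (prefix_head hpre hm) (by decide)

-- A's uniq loop: the 'seen' set and the 'ordered' output stay equal, so the loop is Set.ofList
theorem uniq_loop_eq (items : List String) : ∀ (seen : PySem.Set String),
    (items.foldl
      (fun (st : PySem.Set String × List String) item =>
        if PySem.Set.contains st.1 item then st
        else (PySem.Set.add st.1 item, st.2 ++ [item])) (seen, seen)).2
      = items.foldl PySem.Set.add seen := by
  induction items with
  | nil => intro seen; rfl
  | cons a items ih =>
    intro seen
    simp only [List.foldl_cons]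
    by_cases hc : PySem.Set.contains seen a = true
    · have hkeep : PySem.Set.add seen a = seen := by
        simp only [PySem.Set.add]
        rw [if_pos hc]
      simp only [hc, if_true, hkeep]
      exact ih seen
    · have hadd : PySem.Set.add seen a = seen ++ [a] := by
        simp only [PySem.Set.add]
        rw [if_neg hc]
      simp only [hc, if_false, Bool.false_eq_true, hadd]
      exact ih (seen ++ [a])
theorem uniq_eq_dedup (items : List String) : pyA_uniq items = altDedup items := by
  unfold pyA_uniq altDedup
  rw [PySem.List.dedup_eq_ofList, PySem.Set.ofList_eq_foldl]
  exact uniq_loop_eq items []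

theorem altClassify_eq
    (st5 : List String × List String × List String × List String × List String) (b : String) :
    altClassify st5 b =
      (if pF b then (st5.1 ++ [b], st5.2.1, st5.2.2.1, st5.2.2.2.1, st5.2.2.2.2)
       else if pSz b then (st5.1, st5.2.1 ++ [b], st5.2.2.1, st5.2.2.2.1, st5.2.2.2.2)
       else if pM b then (st5.1, st5.2.1, st5.2.2.1 ++ [b], st5.2.2.2.1, st5.2.2.2.2)
       else if pSt b then (st5.1, st5.2.1, st5.2.2.1, st5.2.2.2.1 ++ [b], st5.2.2.2.2)
       else (st5.1, st5.2.1, st5.2.2.1, st5.2.2.2.1, st5.2.2.2.2 ++ [b])) := rfl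

-- B's single pass produces the filters A computes
theorem classify_spec (blockers : List String) : ∀ (f s m st o : List String),
    blockers.foldl altClassify (f, s, m, st, o) =
      (f ++ blockers.filter pF,
       s ++ blockers.filter (fun b => !pF b && pSz b),
       m ++ blockers.filter (fun b => !pF b && !pSz b && pM b),
       st ++ blockers.filter (fun b => !pF b && !pSz b && !pM b && pSt b),
       o ++ blockers.filter (fun b => !pF b && !pSz b && !pM b && !pSt b)) := by
  induction blockers with
  | nil => intro f s m st o; simp only [List.foldl_nil, List.filter_nil, List.append_nil]
  | cons b bs ih =>
    intro f s m st o
    simp only [List.foldl_cons, altClassify_eq]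
    by_cases h1 : pF b = true
    · simp only [h1, if_true]
      rw [ih]
      simp [h1, List.append_assoc]
    · simp only [h1, if_false, Bool.false_eq_true]
      by_cases h2 : pSz b = true
      · simp only [h2, if_true]
        rw [ih]
        simp [h1, h2, List.append_assoc]
      · simp only [h2, if_false, Bool.false_eq_true]
        by_cases h3 : pM b = true
        · simp only [h3, if_true]
          rw [ih]
          simp [h1, h2, h3, List.append_assoc]
        · simp only [h3, if_false, Bool.false_eq_true]
          by_cases h4 : pSt b = true
          · simp only [h4, if_true]
            rw [ih]
            simp [h1, h2, h3, h4, List.append_assoc]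
          · simp only [h4, if_false, Bool.false_eq_true]
            rw [ih]
            simp [h1, h2, h3, h4, List.append_assoc]

-- membership in a filtered list, for an element of the base list
theorem contains_filter (l : List String) (p : String → Bool) (x : String) (hx : x ∈ l) :
    (l.filter p).contains x = p x := by
  cases hp : p x
  · simp only [Bool.eq_false_iff, ne_eq, List.contains_iff_mem, List.mem_filter, hp]
    simp
  · exact List.contains_iff_mem.mpr (List.mem_filter.mpr ⟨hx, hp⟩)

-- ===== VERDICT (by name: the statement is the Claim_ definition above) =====
theorem prioritize_blockers_py_spec : Claim_equal_prioritize_blockers_py := by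
  intro blockers _
  unfold Spec_prioritize_blockers_py
  by_cases h0 : blockers = []
  · subst h0; rfl
  · unfold prioritize_blockers_py prioritize_blockers_py_alt
    rw [classify_spec]
    simp only [List.nil_append, if_neg h0]
    have hAf : blockers.filter (fun b => b == "funds_source_missing" || b == "funds_nonpositive")
        = blockers.filter pF := rfl
    rw [hAf]
    by_cases hf : blockers.filter pF = []
    · have hfmem : ∀ x ∈ blockers, ¬ pF x = true := List.filter_eq_nil_iff.mp hf
      have hsz : blockers.filter (fun b => !pF b && pSz b) = blockers.filter pSz :=
        List.filter_congr (fun x hx => by simp [hfmem x hx])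
      have hAs : blockers.filter (fun b =>
            (["min_qty_not_met_after_rounding", "invalid_entry", "invalid_sl",
              "invalid_step_size", "invalid_min_qty", "invalid_sl_distance",
              "invalid_leverage"] : List String).any (fun p => PySem.Str.startswith b p))
          = blockers.filter pSz := rfl
      have hne : ¬(([] : List String) ≠ []) := fun h => h rfl
      rw [hf, hsz, hAs]
      simp only [if_neg hne]
      by_cases hs : blockers.filter pSz = []
      · have hsmem : ∀ x ∈ blockers, ¬ pSz x = true := List.filter_eq_nil_iff.mp hs
        have hm : blockers.filter (fun b => !pF b && !pSz b && pM b) = blockers.filter pM :=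
          List.filter_congr (fun x hx => by simp [hfmem x hx, hsmem x hx])
        have hst : blockers.filter (fun b => !pF b && !pSz b && !pM b && pSt b)
            = blockers.filter pSt :=
          List.filter_congr (fun x hx => by
            cases hpst : pSt x
            · simp
            · have : pM x = false := by
                cases hpm : pM x
                · rfl
                · exact absurd (pM_pSt x hpm) (by simp [hpst])
              simp [hfmem x hx, hsmem x hx, this])
        have hot : blockers.filter (fun b =>
              !(blockers.filter pM).contains b && !(blockers.filter pSt).contains b)
            = blockers.filter (fun b => !pF b && !pSz b && !pM b && !pSt b) :=
          List.filter_congr (fun x hx => by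
            rw [contains_filter blockers pM x hx, contains_filter blockers pSt x hx]
            simp [hfmem x hx, hsmem x hx])
        rw [hs, hm, hst, ← hot]
        simp only [if_neg hne]
        exact uniq_eq_dedup _
      · simp only [if_pos hs]
        exact uniq_eq_dedup _
    · simp only [if_pos hf]
      exact uniq_eq_dedup _
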